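-- pv_equiv track=rewrite | github.com/dfk1352/LibreOffice-skills | skills/libreoffice-writer/scripts/writer/tables.py | get_cell_name
-- ===== SOURCE A (Python) =====
-- def get_cell_name(row: int, col: int) -> str:
--     """Convert row/col indices to cell name (e.g., 0, 0 -> 'A1').
--
--     Args:
--         row: Zero-based row index.
--         col: Zero-based column index.
--
--     Returns:
--         Cell name like 'A1', 'B2', etc.
--     """
--     # Convert column index to letter(s)
--     col_name = ""
--     col_num = col + 1
--     while col_num > 0:
--         col_num -= 1
--         col_name = chr(65 + (col_num % 26)) + col_name
--         col_num //= 26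
--
--     return f"{col_name}{row + 1}"
-- ===== SOURCE B (Python) =====
-- def get_cell_name(row: int, col: int) -> str:
--     """Convert row/col indices to cell name (e.g., 0, 0 -> 'A1')."""
--     n = col + 1
--     # Stage 1: find how many letters the name has (names with <= `length`
--     # letters cover the first `span` = 26 + 26^2 + ... + 26^length numbers).
--     length = 0
--     span = 0
--     while span < n:
--         length += 1
--         span += 26 ** length
--     # Stage 2: offset of n within the block of `length`-letter names,
--     # written as a plain fixed-width base-26 numeral, most significant first.
--     offset = n - 1 - (span - 26 ** length)
--     letters = []
--     for i in range(length - 1, -1, -1):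
--         letters.append(chr(65 + offset // 26 ** i % 26))
--     return "".join(letters) + str(row + 1)
-- ===== Notes on version B (the rewrite author's own statement) =====
-- stated objective: alternative
-- what changed: A's single while loop emits bijective-base-26 letters right-to-left by prepending; B first runs a loop to find the name's letter count and block span, then emits the offset within that block as a fixed-width plain base-26 numeral left-to-right.
import Mathlib
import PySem

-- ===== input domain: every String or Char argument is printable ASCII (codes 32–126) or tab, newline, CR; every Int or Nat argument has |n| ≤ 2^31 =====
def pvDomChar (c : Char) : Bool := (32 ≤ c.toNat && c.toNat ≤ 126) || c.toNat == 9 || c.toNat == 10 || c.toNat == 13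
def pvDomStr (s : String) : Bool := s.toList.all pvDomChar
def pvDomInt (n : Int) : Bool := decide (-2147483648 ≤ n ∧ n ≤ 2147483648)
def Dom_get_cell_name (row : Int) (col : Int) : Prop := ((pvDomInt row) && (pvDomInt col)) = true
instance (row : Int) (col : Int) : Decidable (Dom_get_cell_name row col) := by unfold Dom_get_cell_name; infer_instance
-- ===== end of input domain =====

-- B replaces A's single bijective-base-26 while loop (letter prepended per step) by a
-- two-stage algorithm: first find the letter-count (and block span) of the name, then
-- emit the offset within that block as a fixed-width plain base-26 numeral left to
-- right; alternative decomposition, no speed claim.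

-- ===== PORT A =====
-- the while loop: state (col_name, col_num); each iteration prepends one letter
def pvALoop (colName : String) (colNum : Int) : String :=
  if _h : 0 < colNum then
    let c := colNum - 1
    pvALoop (String.ofList [Char.ofNat (65 + PySem.Int.mod c 26).toNat] ++ colName)
            (PySem.Int.floordiv c 26)
  else colName
termination_by colNum.toNat
decreasing_by
  rw [PySem.Int.floordiv_eq_ediv_of_pos (by omega : (0:Int) < 26)]
  have h1 : 0 ≤ (colNum - 1) / 26 := Int.ediv_nonneg (by omega) (by omega)
  have h2 : (colNum - 1) / 26 ≤ colNum - 1 := Int.ediv_le_self _ (by omega)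
  omega

def get_cell_name (row : Int) (col : Int) : String :=
  pvALoop "" (col + 1) ++ PySem.Int.toStr (row + 1)

-- ===== PORT B =====
-- stage 1 while loop: state (length, span); span = 26 + 26^2 + ... + 26^length
-- (length is never negative when called with length = 0, span = 0, so the Nat
-- exponent (length+1).toNat is exact for Python's 26 ** (length+1))
def pvBLen (n : Int) (length : Int) (span : Int) : Int × Int :=
  if _h : span < n then
    pvBLen n (length + 1) (span + 26 ^ (length + 1).toNat)
  else (length, span)
termination_by (n - span).toNat
decreasing_by
  have hp : 0 < (26:Int) ^ (length + 1).toNat := pow_pos (by omega) _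
  omega

def get_cell_name_alt (row : Int) (col : Int) : String :=
  let n := col + 1
  let ls := pvBLen n 0 0
  let offset := n - 1 - (ls.2 - 26 ^ ls.1.toNat)
  -- stage 2 for loop over range(length-1, -1, -1), appending one char per digit
  let letters := (PySem.List.pyRange (ls.1 - 1) (-1) (-1)).foldl
    (fun acc i =>
      acc ++ [Char.ofNat (65 + PySem.Int.mod (PySem.Int.floordiv offset (26 ^ i.toNat)) 26).toNat])
    ([] : List Char)
  String.ofList letters ++ PySem.Int.toStr (row + 1)

-- ===== PRECONDITION & SPEC =====
def Spec_get_cell_name (row : Int) (col : Int) (out : String) : Prop := out = get_cell_name_alt row col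
instance (row : Int) (col : Int) (out : String) : Decidable (Spec_get_cell_name row col out) := by unfold Spec_get_cell_name; infer_instance

-- ===== CLAIM (what is proved, stated in full; the proofs are below) =====
def Claim_equal_get_cell_name : Prop := ∀ (row : Int) (col : Int), Dom_get_cell_name row col → Spec_get_cell_name row col (get_cell_name row col)

-- ===== LEMMAS AND PROOFS =====

-- canonical recursive bijective-base-26 letters function, used only as a proof bridge
def pvToLetters (n : Int) : String :=
  if _h : n ≤ 0 then ""
  else
    pvToLetters (PySem.Int.floordiv (n - 1) 26)
      ++ String.ofList [Char.ofNat (65 + PySem.Int.mod (n - 1) 26).toNat]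
termination_by n.toNat
decreasing_by
  rw [PySem.Int.floordiv_eq_ediv_of_pos (by omega : (0:Int) < 26)]
  have h1 : 0 ≤ (n - 1) / 26 := Int.ediv_nonneg (by omega) (by omega)
  have h2 : (n - 1) / 26 ≤ n - 1 := Int.ediv_le_self _ (by omega)
  omega

theorem pvALoop_eq_toLetters_append (k : Nat) :
    ∀ (n : Int) (s : String), n.toNat = k → pvALoop s n = pvToLetters n ++ s := by
  induction k using Nat.strong_induction_on with
  | _ k ih =>
    intro n s hk
    rw [pvALoop, pvToLetters]
    by_cases h : 0 < n
    · have hd : PySem.Int.floordiv (n - 1) 26 = (n - 1) / 26 :=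
        PySem.Int.floordiv_eq_ediv_of_pos (by omega)
      have h1 : 0 ≤ (n - 1) / 26 := Int.ediv_nonneg (by omega) (by omega)
      have h2 : (n - 1) / 26 ≤ n - 1 := Int.ediv_le_self _ (by omega)
      simp only [dif_pos h, dif_neg (by omega : ¬ n ≤ 0)]
      rw [ih ((PySem.Int.floordiv (n - 1) 26).toNat) (by rw [hd]; omega) _ _ rfl]
      rw [String.append_assoc]
    · simp only [dif_neg h, dif_pos (by omega : n ≤ 0)]
      simp

-- span of all names with at most L letters
def pvS : Nat → Int
  | 0 => 0
  | L + 1 => pvS L + 26 ^ (L + 1)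

theorem pvS_nonneg (L : Nat) : 0 ≤ pvS L := by
  induction L with
  | zero => simp [pvS]
  | succ L ih => have : 0 < (26:Int) ^ (L+1) := pow_pos (by omega) _; simp [pvS]; omega

theorem pvS_succ_eq (L : Nat) : pvS (L + 1) = 26 * (pvS L + 1) := by
  induction L with
  | zero => simp [pvS]
  | succ L ih => simp only [pvS] at *; rw [pow_succ]; ring_nf; ring_nf at ih; omega

-- stage-1 loop reaches exactly (L, pvS L) for the minimal L with n ≤ pvS L
theorem pvBLen_eq (n : Int) (L : Nat) (hub : n ≤ pvS L) (hlb : ∀ j, j < L → pvS j < n) :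
    ∀ d k : Nat, k + d = L → pvBLen n (k : Int) (pvS k) = ((L : Int), pvS L) := by
  intro d
  induction d with
  | zero =>
    intro k hk
    have hkL : k = L := by omega
    subst hkL
    rw [pvBLen, dif_neg (by omega : ¬ pvS k < n)]
  | succ d ih =>
    intro k hk
    have hkL : k < L := by omega
    rw [pvBLen, dif_pos (hlb k hkL)]
    have h1 : ((k : Int) + 1) = ((k + 1 : Nat) : Int) := by push_cast; ring
    have h2 : ((k : Int) + 1).toNat = k + 1 := by omega
    rw [h2, h1]
    have : pvS k + 26 ^ (k + 1) = pvS (k + 1) := rfl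
    rw [this]
    exact ih (k + 1) (by omega)

-- the i-th base-26 digit of off, as the port's character
def pvDig (off : Int) (i : Nat) : Char :=
  Char.ofNat (65 + (off / 26 ^ i) % 26).toNat

theorem pvDig_div (off : Int) (i : Nat) : pvDig (off / 26) i = pvDig off (i + 1) := by
  unfold pvDig
  rw [Int.ediv_ediv_of_nonneg (by omega : (0:Int) ≤ 26), ← pow_succ']

-- the recursive letters function on block L+1 yields the plain base-26 digits of off
theorem toLetters_digits : ∀ (L : Nat) (off : Int), 0 ≤ off → off < 26 ^ (L + 1) →
    pvToLetters (pvS L + off + 1) = String.ofList (((List.range (L + 1)).reverse).map (pvDig off)) := by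
  intro L
  induction L with
  | zero =>
    intro off h0 h1
    rw [pvToLetters]
    simp only [pvS] at *
    rw [dif_neg (by omega : ¬ (0 : Int) + off + 1 ≤ 0)]
    have hs : (0 : Int) + off + 1 - 1 = off := by ring
    rw [hs, PySem.Int.floordiv_eq_ediv_of_pos (by omega : (0:Int) < 26),
        PySem.Int.mod_eq_emod_of_pos (by omega : (0:Int) < 26),
        Int.ediv_eq_zero_of_lt h0 (by simpa using h1)]
    rw [pvToLetters, dif_pos (by omega : (0:Int) ≤ 0)]
    simp [pvDig, Int.emod_eq_of_lt h0 (by simpa using h1)]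
  | succ L ih =>
    intro off h0 h1
    rw [pvToLetters]
    have hS : 0 ≤ pvS (L + 1) := pvS_nonneg _
    rw [dif_neg (by omega : ¬ pvS (L + 1) + off + 1 ≤ 0)]
    have hs : pvS (L + 1) + off + 1 - 1 = off + 26 * (pvS L + 1) := by
      rw [pvS_succ_eq]; ring
    rw [hs, PySem.Int.floordiv_eq_ediv_of_pos (by omega : (0:Int) < 26),
        PySem.Int.mod_eq_emod_of_pos (by omega : (0:Int) < 26),
        Int.add_mul_ediv_left _ _ (by omega : (26:Int) ≠ 0),
        Int.add_mul_emod_self_left]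
    have hdiv0 : 0 ≤ off / 26 := Int.ediv_nonneg h0 (by omega)
    have hdiv1 : off / 26 < 26 ^ (L + 1) := by
      rw [Int.ediv_lt_iff_lt_mul (by omega : (0:Int) < 26), ← pow_succ]
      exact h1
    have harg : off / 26 + (pvS L + 1) = pvS L + (off / 26) + 1 := by ring
    rw [harg, ih (off / 26) hdiv0 hdiv1]
    -- assemble the digit lists
    have hmod : (0 : Int) ≤ off % 26 ∧ off % 26 < 26 :=
      ⟨Int.emod_nonneg _ (by omega), Int.emod_lt_of_pos _ (by omega)⟩
    have hch : Char.ofNat (65 + off % 26).toNat = pvDig off 0 := by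
      unfold pvDig; norm_num
    rw [hch]
    have hlist : ((List.range (L + 1 + 1)).reverse).map (pvDig off)
        = (((List.range (L + 1)).reverse).map (pvDig (off / 26))) ++ [pvDig off 0] := by
      rw [List.range_succ_eq_map, List.reverse_cons, List.map_append]
      congr 1
      rw [List.map_reverse, List.map_reverse, List.map_map]
      congr 1
      exact List.map_congr_left (fun j _ => (pvDig_div off j).symm)
    rw [hlist]
    exact String.ofList_append.symm

-- the stage-2 fold is exactly the digit list, most significant first
theorem pvFold_digits (off : Int) (L : Nat) :
    (PySem.List.pyRange ((L : Int) - 1) (-1) (-1)).foldl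
      (fun acc i =>
        acc ++ [Char.ofNat (65 + PySem.Int.mod (PySem.Int.floordiv off (26 ^ i.toNat)) 26).toNat])
      ([] : List Char)
    = ((List.range L).reverse).map (pvDig off) := by
  have hfold : ∀ (l : List Int) (a : List Char) (f : Int → Char),
      l.foldl (fun acc i => acc ++ [f i]) a = a ++ l.map f := by
    intro l
    induction l with
    | nil => simp
    | cons x xs ih => intro a f; simp [ih]
  rw [hfold _ _ (fun i => Char.ofNat (65 + PySem.Int.mod (PySem.Int.floordiv off (26 ^ i.toNat)) 26).toNat)]
  rw [PySem.List.pyRange_neg_one, List.map_map]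
  apply List.ext_getElem
  · simp
  · intro k hk1 hk2
    have hkL : k < L := by simpa using hk2
    have hi : (L : Int) - 1 - (k : Int) = ((L - 1 - k : Nat) : Int) := by omega
    simp only [List.nil_append, List.getElem_map, List.getElem_range, List.getElem_reverse,
      List.length_range, Function.comp]
    rw [hi, Int.toNat_natCast,
        PySem.Int.floordiv_eq_ediv_of_pos (pow_pos (by omega : (0:Int) < 26) _),
        PySem.Int.mod_eq_emod_of_pos (by omega : (0:Int) < 26)]
    rfl

-- ===== VERDICT (by name: the statement is the Claim_ definition above) =====
theorem get_cell_name_spec : Claim_equal_get_cell_name := by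
  intro row col hdom
  unfold Spec_get_cell_name get_cell_name get_cell_name_alt
  rw [pvALoop_eq_toLetters_append (col + 1).toNat _ _ rfl]
  simp only []
  by_cases hn : col + 1 ≤ 0
  · -- empty column name on both sides
    rw [pvBLen, dif_neg (by omega : ¬ (0:Int) < col + 1)]
    rw [pvToLetters, dif_pos hn]
    simp
  · -- n ≥ 1: find the minimal letter count L
    set n := col + 1 with hn_def
    have h1 : 1 ≤ n := by omega
    have hdom' : n ≤ 2147483649 := by
      unfold Dom_get_cell_name pvDomInt at hdom
      simp at hdom
      omega
    have hex : ∃ L : Nat, n ≤ pvS L := by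
      refine ⟨7, ?_⟩
      have : pvS 7 = 8353082582 := by norm_num [pvS]
      omega
    classical
    set L := Nat.find hex with hL_def
    have hub : n ≤ pvS L := Nat.find_spec hex
    have hlb : ∀ j, j < L → pvS j < n := by
      intro j hj
      have := Nat.find_min hex hj
      omega
    have hLpos : 0 < L := by
      rcases Nat.eq_zero_or_pos L with h | h
      · exfalso; rw [h] at hub; simp [pvS] at hub; omega
      · exact h
    obtain ⟨M, hM⟩ : ∃ M, L = M + 1 := ⟨L - 1, by omega⟩
    have hrun : pvBLen n 0 0 = ((L : Int), pvS L) := by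
      have := pvBLen_eq n L hub hlb L 0 (by omega)
      simpa [pvS] using this
    rw [hrun]
    simp only [hM]
    have hcast : (((M + 1 : Nat) : Int)).toNat = M + 1 := by omega
    have hspan : pvS (M + 1) - 26 ^ (M + 1) = pvS M := by simp [pvS]
    rw [hcast, hspan]
    set off := n - 1 - pvS M with hoff_def
    have hoff0 : 0 ≤ off := by
      have := hlb M (by omega); omega
    have hoff1 : off < 26 ^ (M + 1) := by
      rw [hM] at hub; simp only [pvS] at hub; omega
    have harg : n = pvS M + off + 1 := by omega
    rw [pvFold_digits off (M + 1), harg, toLetters_digits M off hoff0 hoff1]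
    simp
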